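-- pv_equiv track=rewrite | github.com/Mugamta/Boostcamp_AITech5_CV11 | 3.21/이준하_야근지수.PY | solution
-- ===== SOURCE A (Python) =====
-- from heapq import heappush,heappop,heapify
--
-- def solution(n,works):
--     # 최대힙 생성
--     m_works = list(map(lambda x:-x,works))
--     heapify(m_works)
--     # 남은 시간동안, 가장 큰 일부터 처리
--     for _ in range(n):
--         a = heappop(m_works)
--         # 일 다 끝내면, 야근 없다 ~~
--         if a == 0:
--             return 0
--         heappush(m_works,a+1)
--     # 잔업이 있는경우 피로도 도출
--     answer = 0
--     for i in m_works:
--         answer += i**2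
--     return answer
-- ===== SOURCE B (Python) =====
-- def solution(n, works):
--     if n <= 0:
--         return sum(w * w for w in works)
--     M = max(works)
--     clipped = sum(w for w in works if w > 0)
--     if M >= 0 and clipped < n:
--         return 0
--     # binary search the smallest level L with f(L) = sum(max(w-L,0)) <= n
--     lo, hi = M - n, M
--     while lo < hi:
--         mid = (lo + hi) // 2
--         if sum(w - mid for w in works if w > mid) <= n:
--             hi = mid
--         else:
--             lo = mid + 1
--     L = lo
--     r = n - sum(w - L for w in works if w > L)
--     total = sum(min(w, L) ** 2 for w in works)
--     return total - r * (L * L - (L - 1) * (L - 1))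
-- ===== Notes on version B (the rewrite author's own statement) =====
-- stated objective: faster
-- what changed: Replaces A's n-iteration max-heap simulation by a closed form: binary-search the final work level L (smallest L with sum(max(w-L,0)) <= n), then compute the leftover reductions and the sum of squares directly in O(m) passes.
import Mathlib
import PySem

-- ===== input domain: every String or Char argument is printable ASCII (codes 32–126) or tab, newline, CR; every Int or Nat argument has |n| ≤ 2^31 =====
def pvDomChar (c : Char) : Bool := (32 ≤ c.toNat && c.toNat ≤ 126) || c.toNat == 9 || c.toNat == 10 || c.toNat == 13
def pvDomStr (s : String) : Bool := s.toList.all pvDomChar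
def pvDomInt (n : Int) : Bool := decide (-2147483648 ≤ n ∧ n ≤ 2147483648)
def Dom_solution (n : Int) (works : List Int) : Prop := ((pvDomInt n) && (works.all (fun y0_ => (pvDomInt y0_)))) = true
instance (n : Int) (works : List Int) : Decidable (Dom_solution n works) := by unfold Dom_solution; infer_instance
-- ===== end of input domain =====

-- B replaces A's n-step heap simulation by a closed form: binary-search the final work level, then sum the squares directly.

-- ===== PORT A =====
-- heapq is ported through its multiset/min contract (heappop returns the minimum and removes
-- one occurrence of it, heappush adds its argument): exact for this program because the heap
-- holds ints (compared by value) and the only observations A makes of the heap are the popped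
-- minimum's value and a final permutation-invariant sum of squares.
def aRun : Nat → List Int → Int
  | 0, h => h.foldl (fun answer i => answer + i ^ 2) 0
  | k+1, h =>
    match PySem.List.min? h (fun y => y) with
    | none => 0   -- heappop on an empty heap raises IndexError in Python; excluded by Pre_solution
    | some a => if a = 0 then 0 else aRun k ((PySem.List.remove? h a).getD [] ++ [a + 1])

def solution (n : Int) (works : List Int) : Int :=
  aRun n.toNat (works.map (fun x => -x))

-- ===== PORT B =====
-- f(L) = sum(w - L for w in works if w > L)
def fsumB (works : List Int) (L : Int) : Int :=
  ((works.filter (fun w => L < w)).map (fun w => w - L)).sum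

-- the while lo < hi loop of Source B; fuel = (hi - lo).toNat makes the loop total
-- (it strictly dominates the loop's own measure, which shrinks every iteration)
def bsearchGo (works : List Int) (n : Int) : Nat → Int → Int → Int
  | 0, lo, _ => lo
  | fuel + 1, lo, hi =>
    if lo < hi then
      let mid := PySem.Int.floordiv (lo + hi) 2
      if fsumB works mid ≤ n then bsearchGo works n fuel lo mid
      else bsearchGo works n fuel (mid + 1) hi
    else lo

def bsearch (works : List Int) (n : Int) (lo hi : Int) : Int :=
  bsearchGo works n (hi - lo).toNat lo hi

def solution_alt (n : Int) (works : List Int) : Int :=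
  if n ≤ 0 then (works.map (fun w => w * w)).sum
  else
    match PySem.List.max? works (fun y => y) with
    | none => 0   -- max([]) raises ValueError in Python; excluded by Pre_solution
    | some M =>
      let clipped := (works.filter (fun w => 0 < w)).sum
      if 0 ≤ M ∧ clipped < n then 0
      else
        let L := bsearch works n (M - n) M
        let r := n - fsumB works L
        let total := (works.map (fun w => min w L * min w L)).sum
        total - r * (L * L - (L - 1) * (L - 1))

-- ===== PRECONDITION & SPEC =====
-- Pre_ excludes only works = [] with n ≥ 1, where A raises IndexError (heappop of an empty heap).
def Pre_solution (n : Int) (works : List Int) : Prop := works ≠ [] ∨ n ≤ 0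
instance (n : Int) (works : List Int) : Decidable (Pre_solution n works) := by unfold Pre_solution; infer_instance
def pvWitness_solution : Int × List Int := (3, [4, 3, 3])

def Spec_solution (n : Int) (works : List Int) (out : Int) : Prop := out = solution_alt n works
instance (n : Int) (works : List Int) (out : Int) : Decidable (Spec_solution n works out) := by unfold Spec_solution; infer_instance

-- ===== CLAIM (what is proved, stated in full; the proofs are below) =====
def Claim_equal_solution : Prop := ∀ (n : Int) (works : List Int), Dom_solution n works → Pre_solution n works → Spec_solution n works (solution n works)

-- ===== LEMMAS AND PROOFS =====

-- Abstract model, stated on xs = works.map (-·), A's heap contents.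
-- fhN xs lam = number of unit raises needed to bring every element of xs up to lam.
def fhN (xs : List Int) (lam : Int) : Nat := (xs.map (fun x => (lam - x).toNat)).sum
-- cntN xs lam = number of elements ≤ lam.
def cntN (xs : List Int) (lam : Int) : Nat := xs.countP (fun x => decide (x ≤ lam))
-- minimum of a nonempty list, as A's min? computes it
def m0 (xs : List Int) : Int := xs.foldl min (xs.headD 0)
-- water level after k greedy raises: the greatest lam with fhN xs lam ≤ k
def Lam (xs : List Int) (k : Nat) : Int :=
  m0 xs + Nat.findGreatest (fun j => fhN xs (m0 xs + j) ≤ k) k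
-- leftover raises at the level
def Rk (xs : List Int) (k : Nat) : Nat := k - fhN xs (Lam xs k)
-- canonical heap contents after k greedy steps
def Ck (xs : List Int) (k : Nat) : List Int :=
  xs.filter (fun x => decide (Lam xs k < x))
    ++ List.replicate (Rk xs k) (Lam xs k + 1)
    ++ List.replicate (cntN xs (Lam xs k) - Rk xs k) (Lam xs k)

def sumSq (l : List Int) : Int := (l.map (fun i => i ^ 2)).sum


theorem fhN_mono (xs : List Int) {a b : Int} (h : a ≤ b) : fhN xs a ≤ fhN xs b := by
  induction xs with
  | nil => simp [fhN]
  | cons x t ih => simp only [fhN, List.map_cons, List.sum_cons] at *; omega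

theorem fhN_succ (xs : List Int) (lam : Int) : fhN xs (lam + 1) = fhN xs lam + cntN xs lam := by
  induction xs with
  | nil => simp [fhN, cntN]
  | cons x t ih =>
    simp only [fhN, cntN, List.map_cons, List.sum_cons, List.countP_cons] at *
    by_cases hx : x ≤ lam <;> simp [hx] <;> omega

theorem cntN_mono (xs : List Int) {a b : Int} (h : a ≤ b) : cntN xs a ≤ cntN xs b := by
  induction xs with
  | nil => simp [cntN]
  | cons x t ih =>
    simp only [cntN, List.countP_cons, decide_eq_true_eq] at *
    split_ifs <;> omega

theorem cntN_succ_count (xs : List Int) (lam : Int) :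
    cntN xs (lam + 1) = cntN xs lam + xs.count (lam + 1) := by
  induction xs with
  | nil => simp [cntN]
  | cons x t ih =>
    simp only [cntN, List.countP_cons, List.count_cons, decide_eq_true_eq, beq_iff_eq] at *
    split_ifs <;> omega

theorem cntN_pos_of_mem {xs : List Int} {x lam : Int} (hx : x ∈ xs) (hle : x ≤ lam) :
    0 < cntN xs lam := by
  unfold cntN
  exact List.countP_pos_iff.mpr ⟨x, hx, by simpa using hle⟩

theorem foldl_min_le_init : ∀ (t : List Int) (a : Int), t.foldl min a ≤ a := by
  intro t
  induction t with
  | nil => simp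
  | cons x t ih => intro a; exact le_trans (ih (min a x)) (by omega)

theorem foldl_min_le_mem : ∀ (t : List Int) (a x : Int), x ∈ t → t.foldl min a ≤ x := by
  intro t
  induction t with
  | nil => simp
  | cons y t ih =>
    intro a x hx
    rcases List.mem_cons.mp hx with h | h
    · subst h; exact le_trans (foldl_min_le_init t (min a x)) (by omega)
    · exact ih (min a y) x h

theorem foldl_min_cases : ∀ (t : List Int) (a : Int), t.foldl min a = a ∨ t.foldl min a ∈ t := by
  intro t
  induction t with
  | nil => simp
  | cons x t ih =>
    intro a
    rcases ih (min a x) with h | h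
    · simp only [List.foldl_cons] at *
      rcases le_total a x with hax | hax
      · left; rw [h]; omega
      · right; rw [h]; simp [min_eq_right hax]
    · right; simp only [List.foldl_cons]; exact List.mem_cons_of_mem _ h

theorem m0_mem {xs : List Int} (h : xs ≠ []) : m0 xs ∈ xs := by
  match xs with
  | x :: t =>
    unfold m0
    simp only [List.headD_cons, List.foldl_cons, min_self]
    rcases foldl_min_cases t x with h1 | h1
    · rw [h1]; exact List.mem_cons_self
    · exact List.mem_cons_of_mem _ h1

theorem m0_le {xs : List Int} {x : Int} (hx : x ∈ xs) : m0 xs ≤ x := by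
  match xs with
  | y :: t =>
    unfold m0
    simp only [List.headD_cons, List.foldl_cons, min_self]
    rcases List.mem_cons.mp hx with h | h
    · subst h; exact foldl_min_le_init t x
    · exact foldl_min_le_mem t y x h

theorem fhN_eq_zero {xs : List Int} {lam : Int} (h : ∀ x ∈ xs, lam ≤ x) : fhN xs lam = 0 := by
  induction xs with
  | nil => simp [fhN]
  | cons x t ih =>
    simp only [fhN, List.map_cons, List.sum_cons] at *
    have h1 := h x (List.mem_cons_self)
    have h2 := ih (fun y hy => h y (List.mem_cons_of_mem _ hy))
    omega

theorem fhN_m0 {xs : List Int} (_h : xs ≠ []) : fhN xs (m0 xs) = 0 :=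
  fhN_eq_zero (fun _ hx => m0_le hx)

theorem term_le_fhN {xs : List Int} {x : Int} (hx : x ∈ xs) (lam : Int) :
    (lam - x).toNat ≤ fhN xs lam := by
  induction xs with
  | nil => simp at hx
  | cons y t ih =>
    simp only [fhN, List.map_cons, List.sum_cons] at *
    rcases List.mem_cons.mp hx with h | h
    · subst h; omega
    · have := ih h; omega

theorem le_fhN_add {xs : List Int} (h : xs ≠ []) (j : Nat) : j ≤ fhN xs (m0 xs + j) := by
  have := term_le_fhN (m0_mem h) (m0 xs + j)
  omega

theorem Lam_ge (xs : List Int) (k : Nat) : m0 xs ≤ Lam xs k := by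
  unfold Lam
  have : (0 : Int) ≤ (Nat.findGreatest (fun j => fhN xs (m0 xs + j) ≤ k) k : Int) := by positivity
  omega

theorem fhN_Lam_le {xs : List Int} (h : xs ≠ []) (k : Nat) : fhN xs (Lam xs k) ≤ k := by
  unfold Lam
  have := Nat.findGreatest_spec (P := fun j => fhN xs (m0 xs + j) ≤ k) (m := 0) (Nat.zero_le k)
    (by simp [fhN_m0 h])
  simpa using this

theorem lt_fhN_Lam_succ {xs : List Int} (h : xs ≠ []) (k : Nat) : k < fhN xs (Lam xs k + 1) := by
  unfold Lam
  set j := Nat.findGreatest (fun j => fhN xs (m0 xs + j) ≤ k) k with hj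
  rcases eq_or_lt_of_le (Nat.findGreatest_le (P := fun j => fhN xs (m0 xs + j) ≤ k) k) with he | hlt
  · rw [hj, he]
    have := le_fhN_add h (k + 1)
    have hcast : m0 xs + (k : Int) + 1 = m0 xs + ((k + 1 : Nat) : Int) := by push_cast; ring
    rw [hcast]; omega
  · have := Nat.findGreatest_is_greatest (lt_add_one j) (by omega :
      j + 1 ≤ k) (P := fun j => fhN xs (m0 xs + j) ≤ k)
    have hcast : m0 xs + (j : Int) + 1 = m0 xs + ((j + 1 : Nat) : Int) := by push_cast; ring
    rw [hcast]; omega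

theorem Lam_unique {xs : List Int} (h : xs ≠ []) {k : Nat} {lam : Int}
    (h1 : fhN xs lam ≤ k) (h2 : k < fhN xs (lam + 1)) : lam = Lam xs k := by
  by_contra hne
  rcases lt_or_gt_of_ne hne with hlt | hgt
  · have : fhN xs (lam + 1) ≤ fhN xs (Lam xs k) := fhN_mono xs (by omega)
    have := fhN_Lam_le h k
    omega
  · have : fhN xs (Lam xs k + 1) ≤ fhN xs lam := fhN_mono xs (by omega)
    have := lt_fhN_Lam_succ h k
    omega

theorem Rk_lt_cnt {xs : List Int} (h : xs ≠ []) (k : Nat) : Rk xs k < cntN xs (Lam xs k) := by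
  have h1 := fhN_Lam_le h k
  have h2 := lt_fhN_Lam_succ h k
  rw [fhN_succ] at h2
  unfold Rk
  omega


theorem count_filter_int (v : Int) (p : Int → Bool) (l : List Int) :
    (l.filter p).count v = if p v = true then l.count v else 0 := by
  by_cases h : p v = true
  · simp only [h, if_true]; exact List.count_filter h
  · simp only [h]
    refine List.count_eq_zero.mpr (fun hv => ?_)
    exact absurd (List.mem_filter.mp hv).2 h

theorem count_Ck (xs : List Int) (k : Nat) (v : Int) :
    (Ck xs k).count v
      = (if Lam xs k < v then xs.count v else 0)
        + (if v = Lam xs k + 1 then Rk xs k else 0)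
        + (if v = Lam xs k then cntN xs (Lam xs k) - Rk xs k else 0) := by
  unfold Ck
  rw [List.count_append, List.count_append, count_filter_int, List.count_replicate,
    List.count_replicate]
  simp only [beq_iff_eq, decide_eq_true_eq]
  split_ifs <;> omega

theorem Lam_zero {xs : List Int} (hne : xs ≠ []) : Lam xs 0 = m0 xs := by
  refine (Lam_unique hne (k := 0) (by simp [fhN_m0 hne]) ?_).symm
  rw [fhN_succ]
  have := cntN_pos_of_mem (m0_mem hne) (le_refl (m0 xs))
  omega

theorem cntN_m0_eq_count {xs : List Int} (_hne : xs ≠ []) :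
    cntN xs (m0 xs) = xs.count (m0 xs) := by
  unfold cntN
  rw [List.count_eq_countP]
  refine List.countP_congr (fun x hx => ?_)
  have := m0_le hx
  by_cases h : x = m0 xs
  · simp [h]
  · simp [h]; omega

theorem init_perm {xs : List Int} (h : xs ≠ []) : xs.Perm (Ck xs 0) := by
  rw [List.perm_iff_count]
  intro v
  rw [count_Ck, Lam_zero h]
  have hR : Rk xs 0 = 0 := by simp [Rk]
  rw [hR]
  have hcnt := cntN_m0_eq_count h
  by_cases h1 : v = m0 xs
  · subst h1; simp; omega
  · by_cases h2 : m0 xs < v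
    · simp [h1, h2]
    · have hz : xs.count v = 0 :=
        List.count_eq_zero.mpr (fun hv => absurd (m0_le hv) (by omega))
      simp [h1, h2, hz]

theorem step_perm {xs : List Int} (hne : xs ≠ []) (k : Nat) :
    (Ck xs (k + 1)).Perm ((Ck xs k).erase (Lam xs k) ++ [Lam xs k + 1]) := by
  have hfle := fhN_Lam_le hne k
  have hflt := lt_fhN_Lam_succ hne k
  have hRcnt := Rk_lt_cnt hne k
  have hsucc := fhN_succ xs (Lam xs k)
  have hRk : Rk xs k = k - fhN xs (Lam xs k) := rfl
  rw [List.perm_iff_count]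
  intro v
  rw [List.count_append, List.count_erase, count_Ck, count_Ck]
  simp only [beq_iff_eq, List.count_cons, List.count_nil]
  rcases Nat.lt_or_ge (Rk xs k + 1) (cntN xs (Lam xs k)) with hc | hc
  · have hL : Lam xs (k + 1) = Lam xs k := by
      refine (Lam_unique hne ?_ ?_).symm
      · omega
      · rw [fhN_succ]; omega
    have hR : Rk xs (k + 1) = Rk xs k + 1 := by
      unfold Rk; rw [hL]; omega
    rw [hL, hR]
    split_ifs <;> omega
  · have hceq : cntN xs (Lam xs k) = Rk xs k + 1 := by omega
    have hfh1 : fhN xs (Lam xs k + 1) = k + 1 := by omega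
    have hcnt1 : 0 < cntN xs (Lam xs k + 1) := by
      have := cntN_mono xs (by omega : Lam xs k ≤ Lam xs k + 1)
      omega
    have hL : Lam xs (k + 1) = Lam xs k + 1 := by
      refine (Lam_unique hne ?_ ?_).symm
      · omega
      · rw [fhN_succ]; omega
    have hR : Rk xs (k + 1) = 0 := by
      unfold Rk; rw [hL]; omega
    rw [hL, hR]
    by_cases hv : v = Lam xs k + 1
    · subst hv
      have hcs := cntN_succ_count xs (Lam xs k)
      split_ifs <;> omega
    · split_ifs <;> omega

theorem Ck_lower {xs : List Int} {k : Nat} {y : Int} (hy : y ∈ Ck xs k) : Lam xs k ≤ y := by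
  unfold Ck at hy
  simp only [List.mem_append, List.mem_filter, List.mem_replicate, decide_eq_true_eq] at hy
  rcases hy with (h | h) | h
  · omega
  · omega
  · omega

theorem Lam_mem_Ck {xs : List Int} (hne : xs ≠ []) (k : Nat) : Lam xs k ∈ Ck xs k := by
  refine List.count_pos_iff.mp ?_
  rw [count_Ck]
  have := Rk_lt_cnt hne k
  split_ifs <;> omega

theorem min?_of_perm_Ck {xs h : List Int} (hne : xs ≠ []) (k : Nat) (hp : h.Perm (Ck xs k)) :
    PySem.List.min? h (fun y => y) = some (Lam xs k) := by
  have hmemh : Lam xs k ∈ h := hp.mem_iff.mpr (Lam_mem_Ck hne k)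
  obtain ⟨m, hm⟩ : ∃ m, PySem.List.min? h (fun y => y) = some m := by
    cases hmq : PySem.List.min? h (fun y => y) with
    | none =>
      have : h = [] := (PySem.List.min?_eq_none_iff h (fun y => y)).mp hmq
      subst this; simp at hmemh
    | some m => exact ⟨m, rfl⟩
  have h1 : m ∈ h := PySem.List.min?_mem hm
  have h2 : m ≤ Lam xs k := PySem.List.min?_isMin hm (Lam xs k) hmemh
  have h3 : Lam xs k ≤ m := Ck_lower (hp.mem_iff.mp h1)
  rw [hm, show m = Lam xs k from le_antisymm h2 h3]

theorem run_sim_none {xs : List Int} (hne : xs ≠ []) :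
    ∀ (j i : Nat) (h : List Int), h.Perm (Ck xs i) →
      (∃ t, i ≤ t ∧ t < i + j ∧ Lam xs t = 0) → aRun j h = 0 := by
  intro j
  induction j with
  | zero =>
    intro i h _ hex
    obtain ⟨t, ht1, ht2, _⟩ := hex
    omega
  | succ j ih =>
    intro i h hp hex
    have hmem : Lam xs i ∈ h := hp.mem_iff.mpr (Lam_mem_Ck hne i)
    simp only [aRun, min?_of_perm_Ck hne i hp]
    by_cases h0 : Lam xs i = 0
    · simp [h0]
    · rw [if_neg h0, PySem.List.remove?_eq_some_erase h (Lam xs i) hmem]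
      simp only [Option.getD_some]
      refine ih (i + 1) _ ?_ ?_
      · exact ((hp.erase (Lam xs i)).append_right [Lam xs i + 1]).trans
          (step_perm hne i).symm
      · obtain ⟨t, ht1, ht2, ht3⟩ := hex
        have : t ≠ i := fun he => h0 (he ▸ ht3)
        exact ⟨t, by omega, by omega, ht3⟩

theorem run_sim_some {xs : List Int} (hne : xs ≠ []) :
    ∀ (j i : Nat) (h : List Int), h.Perm (Ck xs i) →
      (∀ t, i ≤ t → t < i + j → Lam xs t ≠ 0) → aRun j h = sumSq (Ck xs (i + j)) := by
  intro j
  induction j with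
  | zero =>
    intro i h hp _
    simp only [aRun, Nat.add_zero]
    rw [PySem.List.foldl_add]
    simpa [sumSq] using ((hp.map (fun i => i ^ 2)).sum_eq)
  | succ j ih =>
    intro i h hp hall
    have hmem : Lam xs i ∈ h := hp.mem_iff.mpr (Lam_mem_Ck hne i)
    have h0 : Lam xs i ≠ 0 := hall i (le_refl i) (by omega)
    simp only [aRun, min?_of_perm_Ck hne i hp]
    rw [if_neg h0, PySem.List.remove?_eq_some_erase h (Lam xs i) hmem]
    simp only [Option.getD_some]
    have := ih (i + 1)
      ((h.erase (Lam xs i) ++ [Lam xs i + 1])) (((hp.erase (Lam xs i)).append_right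
        [Lam xs i + 1]).trans (step_perm hne i).symm)
      (fun t ht1 ht2 => hall t (by omega) (by omega))
    rw [show i + (j + 1) = i + 1 + j from by omega]
    exact this


theorem sumSq_neg (works : List Int) :
    sumSq (works.map (fun x => -x)) = (works.map (fun w => w * w)).sum := by
  induction works with
  | nil => simp [sumSq]
  | cons w t ih =>
    simp only [sumSq, List.map_cons, List.sum_cons] at *
    rw [ih, show ((-w) ^ 2 : Int) = w * w from by ring]

theorem foldl_min_neg : ∀ (t : List Int) (a : Int),
    (t.map (fun x => -x)).foldl min (-a) = -(t.foldl max a) := by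
  intro t
  induction t with
  | nil => simp
  | cons x t ih =>
    intro a
    simp only [List.map_cons, List.foldl_cons]
    rw [show min (-a) (-x) = -(max a x) from by omega]
    exact ih (max a x)

theorem m0_neg (w : Int) (t : List Int) :
    m0 ((w :: t).map (fun x => -x)) = -(t.foldl max w) := by
  unfold m0
  simp only [List.map_cons, List.headD_cons, List.foldl_cons, min_self]
  exact foldl_min_neg t w

theorem clipped_eq (works : List Int) :
    (works.filter (fun w => 0 < w)).sum = ((fhN (works.map (fun x => -x)) 0 : Nat) : Int) := by
  induction works with
  | nil => simp [fhN]
  | cons w t ih =>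
    simp only [List.filter_cons, fhN, List.map_cons, List.sum_cons] at *
    by_cases h : 0 < w
    · simp only [h, decide_true, if_true, List.sum_cons]
      rw [Nat.cast_add, ih]
      omega
    · simp only [h, decide_false, Bool.false_eq_true, if_false]
      rw [Nat.cast_add, ih]
      omega

theorem fsumB_eq (works : List Int) (L : Int) :
    fsumB works L = ((fhN (works.map (fun x => -x)) (-L) : Nat) : Int) := by
  induction works with
  | nil => simp [fsumB, fhN]
  | cons w t ih =>
    simp only [fsumB, fhN, List.filter_cons, List.map_cons, List.sum_cons] at *
    by_cases h : L < w
    · simp only [h, decide_true, if_true, List.map_cons, List.sum_cons]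
      rw [Nat.cast_add, ih]
      omega
    · simp only [h, decide_false, Bool.false_eq_true, if_false]
      rw [Nat.cast_add, ih]
      omega

theorem bsearchGo_spec (works : List Int) (n : Int) :
    ∀ (d : Nat) (lo hi : Int), (hi - lo).toNat ≤ d → lo ≤ hi →
      fsumB works hi ≤ n → n < fsumB works (lo - 1) →
      fsumB works (bsearchGo works n d lo hi) ≤ n
        ∧ n < fsumB works (bsearchGo works n d lo hi - 1) := by
  intro d
  induction d with
  | zero =>
    intro lo hi hd hle hhi hlo
    have heq : lo = hi := by omega
    simp only [bsearchGo]
    exact ⟨heq ▸ hhi, hlo⟩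
  | succ d ih =>
    intro lo hi hd hle hhi hlo
    simp only [bsearchGo]
    by_cases h : lo < hi
    · rw [if_pos h]
      have hm := PySem.Int.floordiv_eq_ediv_of_pos (a := lo + hi) (b := 2) (by omega)
      have hb : lo ≤ PySem.Int.floordiv (lo + hi) 2 ∧ PySem.Int.floordiv (lo + hi) 2 < hi := by
        rw [hm]; omega
      by_cases hf : fsumB works (PySem.Int.floordiv (lo + hi) 2) ≤ n
      · rw [if_pos hf]
        exact ih lo (PySem.Int.floordiv (lo + hi) 2) (by omega) (by omega) hf hlo
      · rw [if_neg hf]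
        refine ih (PySem.Int.floordiv (lo + hi) 2 + 1) hi (by omega) (by omega) hhi ?_
        rw [show PySem.Int.floordiv (lo + hi) 2 + 1 - 1 = PySem.Int.floordiv (lo + hi) 2 from by
          ring]
        omega
    · rw [if_neg h]
      have heq : lo = hi := by omega
      exact ⟨heq ▸ hhi, hlo⟩

theorem bsearch_spec (works : List Int) (n : Int) (lo hi : Int) (hle : lo ≤ hi)
    (hhi : fsumB works hi ≤ n) (hlo : n < fsumB works (lo - 1)) :
    fsumB works (bsearch works n lo hi) ≤ n
      ∧ n < fsumB works (bsearch works n lo hi - 1) := by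
  unfold bsearch
  exact bsearchGo_spec works n (hi - lo).toNat lo hi (le_refl _) hle hhi hlo

theorem key_sum (works : List Int) (L : Int) :
    (works.map (fun w => min w L * min w L)).sum
      = (((works.map (fun x => -x)).filter (fun x => decide (-L < x))).map
          (fun i => i ^ 2)).sum
        + (cntN (works.map (fun x => -x)) (-L) : Int) * (L * L) := by
  induction works with
  | nil => simp [cntN]
  | cons w t ih =>
    simp only [List.map_cons, List.sum_cons, List.filter_cons, cntN, List.countP_cons] at *
    by_cases h : w < L
    · have h1 : (-L : Int) < -w := by omega
      have h2 : ¬ (-w ≤ -L) := by omega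
      simp only [h1, decide_true, if_true, h2, decide_false, List.map_cons, List.sum_cons,
        Bool.false_eq_true, if_false, Nat.add_zero]
      rw [min_eq_left (by omega), ih, show ((-w) ^ 2 : Int) = w * w from by ring]
      ring
    · have h1 : ¬ ((-L : Int) < -w) := by omega
      have h2 : (-w : Int) ≤ -L := by omega
      simp only [h1, decide_false, Bool.false_eq_true, if_false, h2, decide_true, if_true]
      rw [min_eq_right (by omega), ih]
      push_cast
      ring

theorem sumSq_Ck (xs : List Int) (k : Nat) :
    sumSq (Ck xs k)
      = ((xs.filter (fun x => decide (Lam xs k < x))).map (fun i => i ^ 2)).sum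
        + (Rk xs k : Int) * (Lam xs k + 1) ^ 2
        + ((cntN xs (Lam xs k) - Rk xs k : Nat) : Int) * (Lam xs k) ^ 2 := by
  unfold sumSq Ck
  rw [List.map_append, List.map_append, List.sum_append, List.sum_append,
    List.map_replicate, List.map_replicate, List.sum_replicate, List.sum_replicate,
    nsmul_eq_mul, nsmul_eq_mul]

-- ===== VERDICT (by name: the statement is the Claim_ definition above) =====
theorem solution_spec : Claim_equal_solution := by
  unfold Claim_equal_solution Spec_solution
  intro n works _ hpre
  cases works with
  | nil =>
    have hn : n ≤ 0 := by
      rcases hpre with h | h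
      · exact absurd rfl h
      · exact h
    simp [solution, solution_alt, aRun, Int.toNat_of_nonpos hn, hn]
  | cons w t =>
    clear hpre
    set xs := ((w :: t).map (fun x => -x)) with hxs
    have hne : xs ≠ [] := by simp [hxs]
    by_cases hn : n ≤ 0
    · unfold solution solution_alt
      rw [if_pos hn, show n.toNat = 0 from Int.toNat_of_nonpos hn]
      simp only [aRun]
      rw [PySem.List.foldl_add, zero_add]
      exact sumSq_neg (w :: t)
    · rw [not_le] at hn
      have hNn : ((n.toNat : Int)) = n := Int.toNat_of_nonneg (by omega)
      set N := n.toNat with hNdef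
      unfold solution solution_alt
      rw [if_neg (by omega : ¬ n ≤ 0)]
      simp only [PySem.List.max?_id_cons]
      set M := t.foldl max w with hM
      have hm0 : m0 xs = -M := m0_neg w t
      have hclip := clipped_eq (w :: t)
      rw [← hxs] at hclip
      by_cases hb : 0 ≤ M ∧ (List.filter (fun w => decide (0 < w)) (w :: t)).sum < n
      · rw [if_pos hb]
        refine run_sim_none hne N 0 xs (init_perm hne) ⟨fhN xs 0, by omega, ?_, ?_⟩
        · rw [Nat.zero_add]
          omega
        · refine (Lam_unique hne (le_refl _) ?_).symm
          rw [fhN_succ]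
          have hpos : 0 < cntN xs 0 := cntN_pos_of_mem (m0_mem hne) (by omega)
          omega
      · rw [if_neg hb]
        have hnoz : ∀ t', 0 ≤ t' → t' < 0 + N → Lam xs t' ≠ 0 := by
          intro t' _ ht' h0
          have hge := Lam_ge xs t'
          have hle2 := fhN_Lam_le hne t'
          rw [h0] at hge hle2
          exact hb ⟨by omega, by omega⟩
        rw [run_sim_some hne N 0 xs (init_perm hne) hnoz, Nat.zero_add]
        -- binary search characterisation
        have hfM : fsumB (w :: t) M ≤ n := by
          rw [fsumB_eq, ← hxs, ← hm0, fhN_m0 hne]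
          omega
        have hflo : n < fsumB (w :: t) (M - n - 1) := by
          rw [fsumB_eq, ← hxs, show -(M - n - 1) = m0 xs + ((N + 1 : Nat) : Int) from by
            push_cast; omega]
          have := le_fhN_add hne (N + 1)
          omega
        have hspec := bsearch_spec (w :: t) n (M - n) M (by omega) hfM
          (by rw [show M - n - 1 = M - n - 1 from rfl]; exact hflo)
        set L := bsearch (w :: t) n (M - n) M with hLdef
        rw [fsumB_eq, ← hxs] at hspec
        have hspec2 : n < ((fhN xs (-(L - 1)) : Nat) : Int) := by
          rw [hxs, ← fsumB_eq]
          exact hspec.2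
        have hLam : -L = Lam xs N := by
          refine Lam_unique hne (by omega) ?_
          rw [show -L + 1 = -(L - 1) from by ring]
          have := hspec2
          omega
        -- final algebra
        rw [sumSq_Ck, key_sum (w :: t) L, ← hxs, ← hLam]
        have hr : n - fsumB (w :: t) L = ((Rk xs N : Nat) : Int) := by
          rw [fsumB_eq, ← hxs]
          unfold Rk
          rw [← hLam]
          have h1 : fhN xs (-L) ≤ N := by omega
          push_cast [Nat.cast_sub h1]
          omega
        rw [hr]
        have hcle : Rk xs N ≤ cntN xs (-L) := by
          rw [hLam]; exact le_of_lt (Rk_lt_cnt hne N)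
        push_cast [Nat.cast_sub hcle]
        ring
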